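-- pv_equiv track=rewrite | github.com/losina/sum19Research | gharchive/json_handler.py | process_msg
-- ===== SOURCE A (Python) =====
-- def process_msg(msg):
--         str1 = ''
--         for i in msg:
--                 if i == '\"':
--                         str1 += '\"'
--                 elif ord(i) in [40, 41, 93, 91]:
--                         str1 += ' '
--                 else:
--                         str1 += i
--         return str1
-- ===== SOURCE B (Python) =====
-- def process_msg(msg):
--     # Split the message into segments at every delimiter (one staged pass per
--     # delimiter), then glue the segments back together with single spaces:
--     # each delimiter occurrence becomes exactly one space, everything else is kept.
--     parts = [msg]
--     for d in '()[]':
--         parts = [piece for part in parts for piece in part.split(d)]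
--     return ' '.join(parts)
-- ===== Notes on version B (the rewrite author's own statement) =====
-- stated objective: alternative
-- what changed: Replaced A's per-character loop with a string accumulator by a segment-based algorithm: the message is staged-split into segments on each of the four delimiters and the segments are rejoined with single spaces, so no character-by-character branching or accumulation happens at all.
import Mathlib
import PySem

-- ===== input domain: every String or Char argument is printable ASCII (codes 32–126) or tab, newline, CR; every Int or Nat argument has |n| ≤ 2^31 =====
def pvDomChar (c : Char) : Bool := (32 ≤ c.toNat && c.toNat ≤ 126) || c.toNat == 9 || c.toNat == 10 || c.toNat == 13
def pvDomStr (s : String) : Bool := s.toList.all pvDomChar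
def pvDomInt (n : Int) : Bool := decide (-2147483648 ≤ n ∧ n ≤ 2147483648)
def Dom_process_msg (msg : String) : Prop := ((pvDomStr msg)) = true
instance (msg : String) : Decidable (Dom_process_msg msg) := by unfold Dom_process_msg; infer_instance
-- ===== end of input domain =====

-- B replaces A's per-character loop (with its no-op '"' branch and string accumulator)
-- by a segment-based algorithm: staged splits on each delimiter, then one join with spaces.

-- ===== PORT A =====
-- one loop step of A: branch order exactly as in the Python
def pmStepA (str1 : String) (i : Char) : String :=
  if i = '"' then str1 ++ "\""
  else if i.toNat ∈ [40, 41, 93, 91] then str1 ++ " "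
  else str1 ++ String.ofList [i]

def process_msg (msg : String) : String :=
  msg.toList.foldl pmStepA ""

-- ===== PORT B =====
-- one stage of Source B's loop: split every current segment on delimiter d and flatten
-- (part.split(d) with a one-character separator is PySem.Chars.splitOn part [d])
def pmSplitParts (parts : List (List Char)) (d : Char) : List (List Char) :=
  parts.flatMap (fun p => PySem.Chars.splitOn p [d])

def process_msg_alt (msg : String) : String :=
  String.ofList (PySem.Chars.join [' ']
    (("()[]".toList).foldl pmSplitParts [msg.toList]))

-- ===== PRECONDITION & SPEC =====
def Spec_process_msg (msg : String) (out : String) : Prop := out = process_msg_alt msg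
instance (msg : String) (out : String) : Decidable (Spec_process_msg msg out) := by unfold Spec_process_msg; infer_instance

-- ===== CLAIM (what is proved, stated in full; the proofs are below) =====
def Claim_equal_process_msg : Prop := ∀ (msg : String), Dom_process_msg msg → Spec_process_msg msg (process_msg msg)

-- ===== LEMMAS AND PROOFS =====

-- substitute one delimiter by a space
def pmSub (d c : Char) : Char := if c = d then ' ' else c

-- what A's branch chain does per character
def pmSubA (c : Char) : Char :=
  if c = '"' then '"' else if c.toNat ∈ [40, 41, 93, 91] then ' ' else c

-- simple recursive specification of splitting on a single character
def pmAux (d : Char) : List Char → List (List Char)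
  | [] => [[]]
  | c :: r => if c = d then [] :: pmAux d r else (pmAux d r).modifyHead (c :: ·)

theorem pmAux_ne_nil (d : Char) (l : List Char) : pmAux d l ≠ [] := by
  induction l with
  | nil => simp [pmAux]
  | cons c r ih =>
    simp only [pmAux]
    split_ifs
    · simp
    · cases h : pmAux d r with
      | nil => exact absurd h ih
      | cons a t => simp [List.modifyHead]

theorem pm_go_eq (d : Char) (fuel : Nat) (l cur : List Char) (acc : List (List Char))
    (h : l.length < fuel) :
    PySem.Chars.splitOn.go [d] fuel l cur acc
      = acc.reverse ++ (pmAux d l).modifyHead (cur.reverse ++ ·) := by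
  induction fuel generalizing l cur acc with
  | zero => omega
  | succ f ih =>
    cases l with
    | nil =>
      simp [PySem.Chars.splitOn.go, pmAux]
    | cons c rest =>
      simp only [PySem.Chars.splitOn.go]
      by_cases hc : c = d
      · subst hc
        have hpre : List.isPrefixOf [c] (c :: rest) = true := by
          simp [List.isPrefixOf]
        rw [if_pos hpre]
        have hdrop : List.drop (List.length [c]) (c :: rest) = rest := rfl
        rw [hdrop, ih rest [] (cur.reverse :: acc) (by simp at h ⊢; omega)]
        cases hx : pmAux c rest with
        | nil => exact absurd hx (pmAux_ne_nil c rest)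
        | cons a t => simp [pmAux, hx, List.modifyHead]
      · have hpre : List.isPrefixOf [d] (c :: rest) = false := by
          simp [List.isPrefixOf]; exact fun hh => (hc hh.symm).elim
        rw [if_neg (by simp [hpre])]
        rw [ih rest (c :: cur) acc (by simp at h ⊢; omega)]
        simp only [pmAux, if_neg hc]
        cases hx : pmAux d rest with
        | nil => exact absurd hx (pmAux_ne_nil d rest)
        | cons a t => simp [List.modifyHead]

theorem pm_splitOn_eq (d : Char) (l : List Char) :
    PySem.Chars.splitOn l [d] = pmAux d l := by
  rw [PySem.Chars.splitOn, pm_go_eq d (l.length + 1) l [] [] (by omega)]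
  cases hx : pmAux d l with
  | nil => exact absurd hx (pmAux_ne_nil d l)
  | cons a t => simp [List.modifyHead]

-- join with single spaces undoes one split: it is the one-delimiter substitution
theorem pm_join_aux (d : Char) (l : List Char) :
    PySem.Chars.join [' '] (pmAux d l) = l.map (pmSub d) := by
  induction l with
  | nil =>
    show PySem.Chars.join [' '] [[]] = []
    rw [PySem.Chars.join_singleton]
  | cons c r ih =>
    simp only [pmAux, List.map_cons]
    by_cases hc : c = d
    · subst hc
      rw [if_pos rfl]
      cases hx : pmAux c r with
      | nil => exact absurd hx (pmAux_ne_nil c r)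
      | cons a t =>
        rw [hx] at ih
        rw [PySem.Chars.join_cons_cons, ih]
        simp [pmSub]
    · rw [if_neg hc]
      cases hx : pmAux d r with
      | nil => exact absurd hx (pmAux_ne_nil d r)
      | cons a t =>
        rw [hx] at ih
        cases t with
        | nil =>
          rw [PySem.Chars.join_singleton] at ih
          show PySem.Chars.join [' '] [c :: a] = pmSub d c :: List.map (pmSub d) r
          rw [PySem.Chars.join_singleton, ih]
          simp [pmSub, hc]
        | cons b tt =>
          show PySem.Chars.join [' '] ((c :: a) :: b :: tt)
              = pmSub d c :: List.map (pmSub d) r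
          rw [PySem.Chars.join_cons_cons] at ih ⊢
          simp [pmSub, hc, ← ih]

theorem pm_join_append (sep a : List Char) (as : List (List Char)) (b : List Char)
    (bs : List (List Char)) :
    PySem.Chars.join sep ((a :: as) ++ (b :: bs))
      = PySem.Chars.join sep (a :: as) ++ sep ++ PySem.Chars.join sep (b :: bs) := by
  induction as generalizing a with
  | nil => rw [List.singleton_append, PySem.Chars.join_cons_cons, PySem.Chars.join_singleton]
  | cons a2 as2 ih =>
    have h1 : PySem.Chars.join sep ((a :: a2 :: as2) ++ b :: bs)
        = a ++ sep ++ PySem.Chars.join sep ((a2 :: as2) ++ b :: bs) := by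
      rw [show (a :: a2 :: as2) ++ b :: bs = a :: a2 :: (as2 ++ b :: bs) from rfl]
      rw [show (a2 :: as2) ++ b :: bs = a2 :: (as2 ++ b :: bs) from rfl]
      exact PySem.Chars.join_cons_cons sep a a2 _
    rw [h1, ih a2, PySem.Chars.join_cons_cons]
    simp [List.append_assoc]

-- one stage of B followed by the final join = mapping the one-delimiter substitution
theorem pm_stage (d : Char) (parts : List (List Char)) :
    PySem.Chars.join [' '] (pmSplitParts parts d)
      = (PySem.Chars.join [' '] parts).map (pmSub d) := by
  induction parts with
  | nil => simp [pmSplitParts, PySem.Chars.join_nil]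
  | cons p rest ih =>
    simp only [pmSplitParts, List.flatMap_cons, pm_splitOn_eq] at *
    cases rest with
    | nil =>
      simp only [List.flatMap_nil, List.append_nil]
      rw [pm_join_aux, PySem.Chars.join_singleton]
    | cons q t =>
      obtain ⟨fb, fbs, hfm⟩ :
          ∃ fb fbs, (q :: t).flatMap (fun p => pmAux d p) = fb :: fbs := by
        simp only [List.flatMap_cons]
        cases hx : pmAux d q with
        | nil => exact absurd hx (pmAux_ne_nil d q)
        | cons a s => exact ⟨a, s ++ t.flatMap (fun p => pmAux d p), by simp⟩
      obtain ⟨pa, pt, hax⟩ : ∃ pa pt, pmAux d p = pa :: pt := by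
        cases hx : pmAux d p with
        | nil => exact absurd hx (pmAux_ne_nil d p)
        | cons a s => exact ⟨a, s, rfl⟩
      rw [hax, hfm, pm_join_append, ← hax, ← hfm, pm_join_aux, ih,
          PySem.Chars.join_cons_cons]
      simp [pmSub]

-- packaging A's step as appending the substituted character
theorem pmStepA_eq (str1 : String) (i : Char) :
    pmStepA str1 i = str1 ++ String.ofList [pmSubA i] := by
  unfold pmStepA pmSubA
  split_ifs <;> rfl

theorem pm_foldA (l : List Char) (acc : String) :
    l.foldl pmStepA acc = acc ++ String.ofList (l.map pmSubA) := by
  induction l generalizing acc with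
  | nil => simp
  | cons c t ih =>
    simp only [List.foldl_cons, List.map_cons, ih, pmStepA_eq]
    rw [String.append_assoc]
    congr 1
    apply String.ext
    simp

-- A's per-character substitution equals the composition of B's four stages
theorem pm_pointwise (c : Char) :
    pmSubA c = pmSub ']' (pmSub '[' (pmSub ')' (pmSub '(' c))) := by
  by_cases h1 : c = '"'
  · subst h1; decide
  · unfold pmSubA
    rw [if_neg h1]
    by_cases h2 : c.toNat ∈ [40, 41, 93, 91]
    · rw [if_pos h2]
      simp only [List.mem_cons, List.not_mem_nil, or_false] at h2
      have key : c = '(' ∨ c = ')' ∨ c = ']' ∨ c = '[' := by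
        rcases h2 with h | h | h | h
        · exact Or.inl (by rw [← Char.ofNat_toNat c, h])
        · exact Or.inr (Or.inl (by rw [← Char.ofNat_toNat c, h]))
        · exact Or.inr (Or.inr (Or.inl (by rw [← Char.ofNat_toNat c, h])))
        · exact Or.inr (Or.inr (Or.inr (by rw [← Char.ofNat_toNat c, h])))
      rcases key with h | h | h | h <;> subst h <;> decide
    · rw [if_neg h2]
      have hp : c ≠ '(' := fun h => h2 (by subst h; decide)
      have hq : c ≠ ')' := fun h => h2 (by subst h; decide)
      have hr : c ≠ '[' := fun h => h2 (by subst h; decide)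
      have hs : c ≠ ']' := fun h => h2 (by subst h; decide)
      simp [pmSub, hp, hq, hr, hs]

-- ===== VERDICT (by name: the statement is the Claim_ definition above) =====
theorem process_msg_spec : Claim_equal_process_msg := by
  intro msg _
  unfold Spec_process_msg process_msg process_msg_alt
  rw [pm_foldA]
  have hfold : ("()[]".toList).foldl pmSplitParts [msg.toList]
      = pmSplitParts (pmSplitParts (pmSplitParts (pmSplitParts [msg.toList] '(') ')') '[') ']' := by
    rfl
  rw [hfold]
  rw [pm_stage ']', pm_stage '[', pm_stage ')', pm_stage '(', PySem.Chars.join_singleton]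
  simp only [List.map_map]
  apply String.ext
  simp only [String.toList_append, String.toList_ofList]
  have : msg.toList.map pmSubA
      = msg.toList.map (pmSub ']' ∘ pmSub '[' ∘ pmSub ')' ∘ pmSub '(') := by
    apply List.map_congr_left
    intro c _
    exact pm_pointwise c
  simp [this]
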